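-- pv_equiv track=rewrite | github.com/KU-AGI/verl | verl/workers/actor/utils.py | find_first_pattern_after
-- ===== SOURCE A (Python) =====
-- from typing import List, Tuple, Optional, Union
--
-- def find_first_pattern_after(
--     seq: List[int],
--     pattern: Optional[List[int]],
--     start_idx: int,
-- ) -> Optional[int]:
--     """seq[start_idx:] 구간에서 pattern 이 처음으로 등장하는 시작 인덱스 (seq 기준)를 반환."""
--     if pattern is None:
--         return None
--     n, m = len(seq), len(pattern)
--     if m == 0 or start_idx > n - m:
--         return None
--     for i in range(start_idx, n - m + 1):
--         if seq[i : i + m] == pattern: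
--             return i
--     return None
-- ===== SOURCE B (Python) =====
-- def find_first_pattern_after(seq, pattern, start_idx):
--     """KMP search: a failure table over the pattern lets the scan advance one
--     text element at a time with no re-slicing; searches from max(start_idx, 0)."""
--     if pattern is None:
--         return None
--     n, m = len(seq), len(pattern)
--     if m == 0:
--         return None
--     start = start_idx if start_idx > 0 else 0
--     if start + m > n:
--         return None
--     fail = [0] * m
--     k = 0
--     for j in range(1, m):
--         while k > 0 and pattern[j] != pattern[k]:
--             k = fail[k - 1]
--         if pattern[j] == pattern[k]:
--             k += 1
--         fail[j] = k
--     j = 0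
--     for i in range(start, n):
--         x = seq[i]
--         while j > 0 and x != pattern[j]:
--             j = fail[j - 1]
--         if x == pattern[j]:
--             j += 1
--         if j == m:
--             return i - m + 1
--     return None
-- ===== Notes on version B (the rewrite author's own statement) =====
-- stated objective: alternative
-- what changed: B replaces A's per-position slice comparison with Knuth-Morris-Pratt: a precomputed failure table drives a single left-to-right scan that never re-slices or re-examines text, searching from max(start_idx, 0).
-- intended difference: For negative start_idx where the pattern occurs at some position p with n+start_idx <= p < n-len(pattern), A's negative-slice wraparound makes it return the negative index p-n (e.g. A([1,2,3,4],[1,2],-5) = -4), while B searches from max(start_idx,0) and returns the first real occurrence index >= 0 (B returns 0 there), which is the intended 'first occurrence from start_idx' value. — e.g. on find_first_pattern_after([1, 2, 3, 4], some [1, 2], -5): A returns some (-4), B returns some 0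
import Mathlib
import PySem

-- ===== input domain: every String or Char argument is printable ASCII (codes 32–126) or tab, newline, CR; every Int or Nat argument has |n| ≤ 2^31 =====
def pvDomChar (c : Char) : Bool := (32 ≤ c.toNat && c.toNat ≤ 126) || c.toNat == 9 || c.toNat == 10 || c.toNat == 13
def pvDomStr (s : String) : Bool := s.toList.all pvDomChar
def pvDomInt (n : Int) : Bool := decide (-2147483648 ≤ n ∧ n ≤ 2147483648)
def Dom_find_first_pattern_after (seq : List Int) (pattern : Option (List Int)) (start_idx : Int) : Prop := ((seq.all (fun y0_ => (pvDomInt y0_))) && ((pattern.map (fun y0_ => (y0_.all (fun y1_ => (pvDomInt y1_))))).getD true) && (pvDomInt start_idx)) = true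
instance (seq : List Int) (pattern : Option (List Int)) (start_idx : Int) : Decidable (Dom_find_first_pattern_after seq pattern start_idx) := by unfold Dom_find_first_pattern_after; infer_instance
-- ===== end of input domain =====

-- B replaces A's per-position slice comparison with KMP (failure table + single scan)
-- and searches from max(start_idx, 0); A's wrapped negative-index results are stated as D_ below.
-- ===== PORT A =====
def find_first_pattern_after (seq : List Int) (pattern : Option (List Int)) (start_idx : Int) : Option Int :=
  match pattern with
  | none => none
  | some pat =>
    let n : Int := PySem.List.len seq
    let m : Int := PySem.List.len pat
    if m = 0 ∨ start_idx > n - m then none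
    else
      -- for i in range(start_idx, n - m + 1): if seq[i:i+m] == pattern: return i; return None
      (PySem.List.pyRange start_idx (n - m + 1) 1).findSome? (fun i =>
        if PySem.List.slice seq (some i) (some (i + m)) = pat then some i else none)

-- ===== PORT B =====
-- while k > 0 and x != pattern[k]: k = fail[k-1]
-- fuel bounds the while loop: for the actual failure table each step strictly decreases k,
-- so fuel = the initial k is always sufficient; pattern/fail indices are in range on all
-- executed paths, so the .getD 0 defaults are never used there.
def kmpFall (pat fail : List Int) (x : Int) : Nat → Int → Int
  | 0, k => k
  | Nat.succ f, k =>
      if 0 < k ∧ ¬ x = (PySem.List.pyGet? pat k).getD 0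
      then kmpFall pat fail x f ((PySem.List.pyGet? fail (k - 1)).getD 0)
      else k

-- loop body of: for j in range(1, m): while ...; if pattern[j] == pattern[k]: k += 1; fail[j] = k
def buildStep (pat : List Int) (st : List Int × Int) (j : Int) : List Int × Int :=
  let x := (PySem.List.pyGet? pat j).getD 0
  let k1 := kmpFall pat st.1 x st.2.toNat st.2
  let k2 := if x = (PySem.List.pyGet? pat k1).getD 0 then k1 + 1 else k1
  (st.1.set j.toNat k2, k2)

-- fail = [0]*m; k = 0; for j in range(1, m): ...
def buildFail (pat : List Int) : List Int :=
  ((PySem.List.pyRange 1 (PySem.List.len pat) 1).foldl (buildStep pat)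
    (List.replicate pat.length 0, 0)).1

-- for i in range(start, n): x = seq[i]; while ...; if x == pattern[j]: j += 1;
--                           if j == m: return i - m + 1
def kmpSearch (seq pat fail : List Int) (m : Int) : List Int → Int → Option Int
  | [], _ => none
  | i :: rest, j =>
    let x := (PySem.List.pyGet? seq i).getD 0
    let j1 := kmpFall pat fail x j.toNat j
    let j2 := if x = (PySem.List.pyGet? pat j1).getD 0 then j1 + 1 else j1
    if j2 = m then some (i - m + 1) else kmpSearch seq pat fail m rest j2

def find_first_pattern_after_alt (seq : List Int) (pattern : Option (List Int)) (start_idx : Int) : Option Int :=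
  match pattern with
  | none => none
  | some pat =>
    let n : Int := PySem.List.len seq
    let m : Int := PySem.List.len pat
    if m = 0 then none
    else
      let start : Int := if start_idx > 0 then start_idx else 0
      if start + m > n then none
      else
        let fail := buildFail pat
        kmpSearch seq pat fail m (PySem.List.pyRange start n 1) 0

-- ===== PRECONDITION & SPEC =====
-- For negative start_idx where the pattern occurs at a position p with n+start_idx ≤ p < n-m,
-- A's negative-slice wraparound returns the negative index p-n, while B searches from
-- max(start_idx,0) and returns the first real occurrence index ≥ 0 — the intended value.
def D_find_first_pattern_after (seq : List Int) (pattern : Option (List Int)) (start_idx : Int) : Prop :=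
  pattern.getD [] ≠ [] ∧ start_idx < 0 ∧
  ∃ p ∈ List.range seq.length,
    (seq.length : Int) + start_idx ≤ p ∧
    p + (pattern.getD []).length < seq.length ∧
    pattern.getD [] <+: seq.drop p

instance (seq : List Int) (pattern : Option (List Int)) (start_idx : Int) : Decidable (D_find_first_pattern_after seq pattern start_idx) := by
  unfold D_find_first_pattern_after; infer_instance

def Spec_find_first_pattern_after (seq : List Int) (pattern : Option (List Int)) (start_idx : Int) (out : Option Int) : Prop := ¬ D_find_first_pattern_after seq pattern start_idx → out = find_first_pattern_after_alt seq pattern start_idx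
instance (seq : List Int) (pattern : Option (List Int)) (start_idx : Int) (out : Option Int) : Decidable (Spec_find_first_pattern_after seq pattern start_idx out) := by unfold Spec_find_first_pattern_after; infer_instance

def pvDiffWitness_find_first_pattern_after : List Int × Option (List Int) × Int := ([1, 2, 3, 4], some [1, 2], -5)
def pvDiffWitnessOut_find_first_pattern_after : (Option Int) × (Option Int) := (some (-4), some 0)

-- ===== CLAIM (what is proved, stated in full; the proofs are below) =====
def Claim_unchanged_find_first_pattern_after : Prop := ∀ (seq : List Int) (pattern : Option (List Int)) (start_idx : Int), Dom_find_first_pattern_after seq pattern start_idx → Spec_find_first_pattern_after seq pattern start_idx (find_first_pattern_after seq pattern start_idx)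
def Claim_changed_find_first_pattern_after : Prop := Dom_find_first_pattern_after (pvDiffWitness_find_first_pattern_after.1) (pvDiffWitness_find_first_pattern_after.2.1) (pvDiffWitness_find_first_pattern_after.2.2) ∧ D_find_first_pattern_after (pvDiffWitness_find_first_pattern_after.1) (pvDiffWitness_find_first_pattern_after.2.1) (pvDiffWitness_find_first_pattern_after.2.2) ∧ find_first_pattern_after (pvDiffWitness_find_first_pattern_after.1) (pvDiffWitness_find_first_pattern_after.2.1) (pvDiffWitness_find_first_pattern_after.2.2) = pvDiffWitnessOut_find_first_pattern_after.1 ∧ find_first_pattern_after_alt (pvDiffWitness_find_first_pattern_after.1) (pvDiffWitness_find_first_pattern_after.2.1) (pvDiffWitness_find_first_pattern_after.2.2) = pvDiffWitnessOut_find_first_pattern_after.2 ∧ pvDiffWitnessOut_find_first_pattern_after.1 ≠ pvDiffWitnessOut_find_first_pattern_after.2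
def Claim_exact_find_first_pattern_after : Prop := ∀ (seq : List Int) (pattern : Option (List Int)) (start_idx : Int), Dom_find_first_pattern_after seq pattern start_idx → D_find_first_pattern_after seq pattern start_idx → find_first_pattern_after seq pattern start_idx ≠ find_first_pattern_after_alt seq pattern start_idx

-- ===== LEMMAS AND PROOFS =====

-- length of the longest proper border of pat.take t (a border: a prefix that is a suffix)
def brd (pat : List Int) (t : Nat) : Nat :=
  Nat.findGreatest (fun c => pat.take c <:+ pat.take t) (t - 1)

-- length of the longest prefix of pat that is a suffix of the processed text t
def matchLen (pat t : List Int) : Nat :=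
  Nat.findGreatest (fun k => pat.take k <:+ t) pat.length

-- specification twin of kmpFall, phrased over the true border function brd
def gF (pat : List Int) (x : Int) : Nat → Nat → Nat
  | 0, j => j
  | Nat.succ f, j => if 0 < j ∧ ¬ x = pat.getD j 0 then gF pat x f (brd pat j) else j

def gStep (pat : List Int) (x : Int) (f j : Nat) : Nat :=
  if x = pat.getD (gF pat x f j) 0 then gF pat x f j + 1 else gF pat x f j

-- reference scan: first j ≥ i with seq[j:j+m] = pat (as drop/take), else none
def naiveFrom (seq pat : List Int) (i : Nat) : Nat → Option Int
  | 0 => if (seq.drop i).take pat.length = pat then some (i : Int) else none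
  | Nat.succ k =>
      if (seq.drop i).take pat.length = pat then some (i : Int)
      else naiveFrom seq pat (i + 1) k

theorem brd_le (pat : List Int) (t : Nat) : brd pat t ≤ t - 1 :=
  Nat.findGreatest_le _

theorem brd_suffix (pat : List Int) (t : Nat) : pat.take (brd pat t) <:+ pat.take t := by
  have h0 : (fun c => pat.take c <:+ pat.take t) 0 := by simp
  unfold brd
  exact Nat.findGreatest_spec (P := fun c => pat.take c <:+ pat.take t) (Nat.zero_le (t - 1)) h0

theorem brd_le_of (pat : List Int) (t c : Nat) (hc : c < t) (h : pat.take c <:+ pat.take t) :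
    c ≤ brd pat t := by
  unfold brd
  exact Nat.le_findGreatest (P := fun c => pat.take c <:+ pat.take t) (by omega) h

theorem suffix_take_mono (pat : List Int) (j c b : Nat) (hcb : c ≤ b)
    (h1 : pat.take c <:+ pat.take j) (h2 : pat.take b <:+ pat.take j) :
    pat.take c <:+ pat.take b := by
  apply List.suffix_of_suffix_length_le h1 h2
  simp only [List.length_take]; omega

theorem suffix_snoc (u t : List Int) (x : Int) (h : u <:+ t) : u ++ [x] <:+ t ++ [x] := by
  obtain ⟨p, rfl⟩ := h
  exact ⟨p, by simp⟩

theorem suffix_snoc_iff (u t : List Int) (x y : Int) (h : u ++ [x] <:+ t ++ [y]) :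
    x = y ∧ u <:+ t := by
  obtain ⟨p, hp⟩ := h
  rw [← List.append_assoc, ← List.concat_eq_append, ← List.concat_eq_append] at hp
  rw [List.concat_inj] at hp
  exact ⟨hp.2, ⟨p, hp.1⟩⟩

theorem take_snoc (pat : List Int) (k : Nat) (h0 : 0 < k) (hk : k ≤ pat.length) :
    pat.take k = pat.take (k - 1) ++ [pat.getD (k - 1) 0] := by
  have hlt : k - 1 < pat.length := by omega
  conv_lhs => rw [show k = (k - 1) + 1 by omega, List.take_add_one]
  rw [List.getElem?_eq_getElem hlt, List.getD_eq_getElem?_getD, List.getElem?_eq_getElem hlt]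
  simp

theorem gs_sound (pat : List Int) (x : Int) :
    ∀ (f j : Nat), j ≤ f →
      gF pat x f j ≤ j ∧ pat.take (gF pat x f j) <:+ pat.take j ∧
        (gF pat x f j = 0 ∨ x = pat.getD (gF pat x f j) 0) := by
  intro f
  induction f with
  | zero =>
    intro j hj
    have : j = 0 := by omega
    subst this
    exact ⟨le_rfl, List.suffix_refl _, Or.inl rfl⟩
  | succ f ih =>
    intro j hj
    simp only [gF]
    split_ifs with h
    · have hb : brd pat j < j := by have := brd_le pat j; omega
      obtain ⟨h1, h2, h3⟩ := ih (brd pat j) (by omega)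
      exact ⟨by omega, h2.trans (brd_suffix pat j), h3⟩
    · refine ⟨le_rfl, List.suffix_refl _, ?_⟩
      by_cases hj0 : j = 0
      · exact Or.inl hj0
      · right
        by_contra hx
        exact h ⟨by omega, hx⟩

theorem gs_complete (pat : List Int) (x : Int) :
    ∀ (f j c : Nat), j ≤ f → j ≤ pat.length → c ≤ j →
      pat.take c <:+ pat.take j → x = pat.getD c 0 → c ≤ gF pat x f j := by
  intro f
  induction f with
  | zero =>
    intro j c hjf _ hcj _ _
    simpa [gF] using hcj
  | succ f ih =>
    intro j c hjf hjm hcj hsuf hx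
    simp only [gF]
    split_ifs with h
    · obtain ⟨hj0, hxj⟩ := h
      have hcj' : c ≠ j := by rintro rfl; exact hxj hx
      have hb : brd pat j < j := by have := brd_le pat j; omega
      have hcb : c ≤ brd pat j := brd_le_of pat j c (by omega) hsuf
      have hsuf' : pat.take c <:+ pat.take (brd pat j) :=
        suffix_take_mono pat j c (brd pat j) hcb hsuf (brd_suffix pat j)
      exact ih (brd pat j) c (by omega) (by omega) hcb hsuf' hx
    · exact hcj

theorem step_sound (pat t : List Int) (x : Int) (f j : Nat) (hjf : j ≤ f)
    (hjm : j < pat.length) (hsuf : pat.take j <:+ t) :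
    gStep pat x f j ≤ j + 1 ∧ pat.take (gStep pat x f j) <:+ t ++ [x] := by
  obtain ⟨h1, h2, h3⟩ := gs_sound pat x f j hjf
  unfold gStep
  split_ifs with hx
  · refine ⟨by omega, ?_⟩
    have hr : gF pat x f j < pat.length := by omega
    have : pat.take (gF pat x f j + 1)
        = pat.take (gF pat x f j) ++ [pat.getD (gF pat x f j) 0] := by
      have := take_snoc pat (gF pat x f j + 1) (by omega) (by omega)
      simpa using this
    rw [this, ← hx]
    exact suffix_snoc _ _ _ (h2.trans hsuf)
  · have h0 : gF pat x f j = 0 := by tauto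
    rw [h0]
    exact ⟨by omega, by simp⟩

theorem step_complete (pat t : List Int) (x : Int) (f j capC : Nat) (hjf : j ≤ f)
    (hjm : j ≤ pat.length) (hsuf : pat.take j <:+ t)
    (hmax : ∀ c, c ≤ capC → pat.take c <:+ t → c ≤ j) :
    ∀ k, 0 < k → k - 1 ≤ capC → k ≤ pat.length → pat.take k <:+ t ++ [x] →
      k ≤ gStep pat x f j := by
  intro k hk0 hkc hkm hksuf
  rw [take_snoc pat k hk0 hkm] at hksuf
  obtain ⟨hxk, hsk⟩ := suffix_snoc_iff _ _ _ _ hksuf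
  have hkj : k - 1 ≤ j := hmax (k - 1) hkc hsk
  have hsk' : pat.take (k - 1) <:+ pat.take j :=
    List.suffix_of_suffix_length_le hsk hsuf (by simp only [List.length_take]; omega)
  have hle : k - 1 ≤ gF pat x f j :=
    gs_complete pat x f j (k - 1) hjf hjm hkj hsk' hxk.symm
  obtain ⟨_, _, h3⟩ := gs_sound pat x f j hjf
  unfold gStep
  split_ifs with hx
  · omega
  · have h0 : gF pat x f j = 0 := by tauto
    exfalso
    apply hx
    rw [h0]
    have : k - 1 = 0 := by omega
    rw [this] at hxk
    exact hxk.symm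

theorem matchLen_snoc (pat t : List Int) (x : Int) (f : Nat) (hm : 1 ≤ pat.length)
    (hf : matchLen pat t ≤ f) (hlt : matchLen pat t < pat.length) :
    matchLen pat (t ++ [x]) = gStep pat x f (matchLen pat t) := by
  have hsuf : pat.take (matchLen pat t) <:+ t := by
    have h0 : (fun k => pat.take k <:+ t) 0 := by simp
    unfold matchLen
    exact Nat.findGreatest_spec (P := fun k => pat.take k <:+ t) (Nat.zero_le pat.length) h0
  obtain ⟨hs1, hs2⟩ := step_sound pat t x f (matchLen pat t) hf hlt hsuf
  apply le_antisymm
  · by_cases h0 : matchLen pat (t ++ [x]) = 0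
    · omega
    · have hP : pat.take (matchLen pat (t ++ [x])) <:+ t ++ [x] := by
        have h00 : (fun k => pat.take k <:+ t ++ [x]) 0 := by simp
        unfold matchLen
        exact Nat.findGreatest_spec (P := fun k => pat.take k <:+ t ++ [x]) (Nat.zero_le pat.length) h00
      have hle : matchLen pat (t ++ [x]) ≤ pat.length := Nat.findGreatest_le _
      exact step_complete pat t x f (matchLen pat t) pat.length hf (by omega) hsuf
        (fun c hc hcs => by unfold matchLen; exact Nat.le_findGreatest (P := fun k => pat.take k <:+ t) hc hcs)
        _ (by omega) (by omega) hle hP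
  · have h := Nat.le_findGreatest (P := fun k => pat.take k <:+ t ++ [x]) (n := pat.length)
      (m := gStep pat x f (matchLen pat t)) (by omega) hs2
    exact h

-- kmpFall computes gF whenever the fail entries below the start agree with brd
theorem kmpFall_eq_gF (pat fail : List Int) (x : Int) :
    ∀ (f k : Nat),
      (∀ c : Nat, 0 < c → c ≤ k → (PySem.List.pyGet? fail ((c : Int) - 1)).getD 0 = (brd pat c : Int)) →
      kmpFall pat fail x f (k : Int) = ((gF pat x f k : Nat) : Int) := by
  intro f
  induction f with
  | zero => intro k _; rfl
  | succ f ih =>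
    intro k hF
    simp only [kmpFall, gF]
    have hget : (PySem.List.pyGet? pat (k : Int)).getD 0 = pat.getD k 0 := by
      rw [PySem.List.pyGet?_natCast, List.getD_eq_getElem?_getD]
    rw [hget]
    have hcond : (0 < (k : Int) ∧ ¬ x = pat.getD k 0) ↔ (0 < k ∧ ¬ x = pat.getD k 0) := by
      constructor <;> (rintro ⟨h1, h2⟩; exact ⟨by exact_mod_cast h1, h2⟩)
    split_ifs with h1 h2 h2
    · rw [hF k (hcond.mp h1).1 le_rfl]
      have hb : brd pat k ≤ k := by have := brd_le pat k; omega
      exact ih (brd pat k) (fun c hc hck => hF c hc (by omega))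
    · exact absurd (hcond.mp h1) h2
    · exact absurd (hcond.mpr h2) h1
    · rfl

-- the failure-table invariant through the build loop
theorem build_inv (pat : List Int) (hm : 1 ≤ pat.length) :
    ∀ jj : Nat, 1 ≤ jj → jj ≤ pat.length →
      (((PySem.List.pyRange 1 (jj : Int) 1).foldl (buildStep pat)
          (List.replicate pat.length 0, 0)).1.length = pat.length ∧
       (∀ i : Nat, i < pat.length →
          ((PySem.List.pyRange 1 (jj : Int) 1).foldl (buildStep pat)
            (List.replicate pat.length 0, 0)).1[i]?
            = some (if i < jj then (brd pat (i + 1) : Int) else 0)) ∧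
       ((PySem.List.pyRange 1 (jj : Int) 1).foldl (buildStep pat)
          (List.replicate pat.length 0, 0)).2 = (brd pat jj : Int)) := by
  intro jj
  induction jj with
  | zero => intro h; omega
  | succ jj ih =>
    intro _ hjm
    by_cases hjj : jj = 0
    · subst hjj
      have hr : PySem.List.pyRange 1 ((1 : Nat) : Int) 1 = [] := by
        apply PySem.List.pyRange_one_eq_nil; norm_num
      rw [hr]
      simp only [List.foldl_nil]
      refine ⟨by simp, ?_, ?_⟩
      · intro i hi
        rw [List.getElem?_eq_getElem (by simpa using hi)]
        simp only [List.getElem_replicate]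
        have : brd pat 1 = 0 := by
          unfold brd; simp
        split_ifs with h
        · have : i = 0 := by omega
          subst this
          simp [brd]
        · rfl
      · show (0 : Int) = (brd pat 1 : Nat)
        simp [brd]
    · have h1jj : 1 ≤ jj := by omega
      obtain ⟨ihlen, ihent, ihk⟩ := ih h1jj (by omega)
      have hsplit : PySem.List.pyRange 1 ((jj + 1 : Nat) : Int) 1
          = PySem.List.pyRange 1 (jj : Int) 1 ++ [(jj : Int)] := by
        have : ((jj + 1 : Nat) : Int) = (jj : Int) + 1 := by push_cast; ring
        rw [this]
        exact PySem.List.pyRange_one_succ_right (a := 1) (b := (jj : Int)) (by omega)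
      rw [hsplit, List.foldl_append]
      set st := (PySem.List.pyRange 1 (jj : Int) 1).foldl (buildStep pat)
        (List.replicate pat.length 0, 0) with hst
      simp only [List.foldl_cons, List.foldl_nil]
      -- unfold one buildStep
      have hx : (PySem.List.pyGet? pat (jj : Int)).getD 0 = pat.getD jj 0 := by
        rw [PySem.List.pyGet?_natCast, List.getD_eq_getElem?_getD]
      set x := pat.getD jj 0 with hxdef
      have hb_lt : brd pat jj < jj := by have := brd_le pat jj; omega
      have hFsub : ∀ c : Nat, 0 < c → c ≤ brd pat jj →
          (PySem.List.pyGet? st.1 ((c : Int) - 1)).getD 0 = (brd pat c : Int) := by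
        intro c hc hcb
        have hc1 : c - 1 < pat.length := by omega
        have : ((c : Int) - 1) = ((c - 1 : Nat) : Int) := by omega
        rw [this, PySem.List.pyGet?_natCast]
        rw [ihent (c - 1) hc1]
        have : c - 1 < jj := by omega
        rw [if_pos this]
        have : c - 1 + 1 = c := by omega
        rw [this]
        rfl
      have hk1 : kmpFall pat st.1 x st.2.toNat st.2
          = ((gF pat x (brd pat jj) (brd pat jj) : Nat) : Int) := by
        rw [ihk]
        have : ((brd pat jj : Nat) : Int).toNat = brd pat jj := by simp
        rw [this]
        exact kmpFall_eq_gF pat st.1 x (brd pat jj) (brd pat jj) hFsub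
      -- the computed k2 equals brd pat (jj+1)
      have htk : pat.take jj ++ [x] = pat.take (jj + 1) := by
        rw [take_snoc pat (jj + 1) (by omega) (by omega)]
        simp only [Nat.add_sub_cancel]
        rw [hxdef]
      have hnew : gStep pat x (brd pat jj) (brd pat jj) = brd pat (jj + 1) := by
        have hsuf : pat.take (brd pat jj) <:+ pat.take jj := brd_suffix pat jj
        obtain ⟨hs1, hs2⟩ := step_sound pat (pat.take jj) x (brd pat jj) (brd pat jj)
          le_rfl (by omega) hsuf
        apply le_antisymm
        · apply Nat.le_findGreatest (by omega)
          rw [← htk] at *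
          exact hs2
        · by_cases h0 : brd pat (jj + 1) = 0
          · omega
          · have hP : pat.take (brd pat (jj + 1)) <:+ pat.take (jj + 1) := brd_suffix pat (jj + 1)
            have hle : brd pat (jj + 1) ≤ jj := by have := brd_le pat (jj + 1); omega
            rw [← htk] at hP
            exact step_complete pat (pat.take jj) x (brd pat jj) (brd pat jj) (jj - 1)
              le_rfl (by omega) hsuf
              (fun c hc hcs => brd_le_of pat jj c (by omega) hcs)
              _ (by omega) (by omega) (by omega) hP
      have hgv : (PySem.List.pyGet? pat ((gF pat x (brd pat jj) (brd pat jj) : Nat) : Int)).getD 0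
          = pat.getD (gF pat x (brd pat jj) (brd pat jj)) 0 := by
        rw [PySem.List.pyGet?_natCast, List.getD_eq_getElem?_getD]
      have hk2expr : (if x = pat.getD (gF pat x (brd pat jj) (brd pat jj)) 0
          then ((gF pat x (brd pat jj) (brd pat jj) : Nat) : Int) + 1
          else ((gF pat x (brd pat jj) (brd pat jj) : Nat) : Int))
          = ((brd pat (jj + 1) : Nat) : Int) := by
        rw [← hnew]
        unfold gStep
        split_ifs <;> push_cast <;> ring
      have hstep : buildStep pat st ((jj : Nat) : Int)
          = (st.1.set jj ((brd pat (jj + 1) : Nat) : Int), ((brd pat (jj + 1) : Nat) : Int)) := by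
        simp only [buildStep]
        rw [hx, hk1, hgv, hk2expr]
        simp
      rw [hstep]
      refine ⟨by simpa using ihlen, ?_, rfl⟩
      intro i hi
      rw [List.getElem?_set]
      by_cases hij : jj = i
      · subst hij
        rw [if_pos rfl, ihlen, if_pos hi, if_pos (Nat.lt_succ_self jj)]
      · rw [if_neg hij, ihent i hi]
        congr 1
        by_cases hlt : i < jj
        · rw [if_pos hlt, if_pos (by omega)]
        · rw [if_neg hlt, if_neg (by omega)]

theorem buildFail_spec (pat : List Int) (hm : 1 ≤ pat.length) :
    ∀ c : Nat, 0 < c → c ≤ pat.length →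
      (PySem.List.pyGet? (buildFail pat) ((c : Int) - 1)).getD 0 = (brd pat c : Int) := by
  intro c hc hcm
  obtain ⟨hlen, hent, _⟩ := build_inv pat hm pat.length hm le_rfl
  unfold buildFail
  rw [PySem.List.len_eq]
  have : ((c : Int) - 1) = ((c - 1 : Nat) : Int) := by omega
  rw [this, PySem.List.pyGet?_natCast]
  rw [hent (c - 1) (by omega), if_pos (by omega)]
  have : c - 1 + 1 = c := by omega
  rw [this]
  rfl

-- naive-scan characterization -----------------------------------------------

theorem naiveFrom_none (seq pat : List Int) :
    ∀ (k i : Nat), i + pat.length + k = seq.length →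
      (∀ p, i ≤ p → p + pat.length ≤ seq.length → (seq.drop p).take pat.length ≠ pat) →
      naiveFrom seq pat i k = none := by
  intro k
  induction k with
  | zero =>
    intro i hn h
    simp only [naiveFrom]
    rw [if_neg (h i le_rfl (by omega))]
  | succ k ih =>
    intro i hn h
    simp only [naiveFrom]
    rw [if_neg (h i le_rfl (by omega))]
    exact ih (i + 1) (by omega) (fun p hp => h p (by omega))

theorem naiveFrom_some (seq pat : List Int) :
    ∀ (k i p : Nat), i + pat.length + k = seq.length → i ≤ p → p + pat.length ≤ seq.length →
      (seq.drop p).take pat.length = pat →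
      (∀ q, i ≤ q → q < p → (seq.drop q).take pat.length ≠ pat) →
      naiveFrom seq pat i k = some (p : Int) := by
  intro k
  induction k with
  | zero =>
    intro i p hn hip hpm hsl _
    have : p = i := by omega
    subst this
    simp only [naiveFrom]
    rw [if_pos hsl]
  | succ k ih =>
    intro i p hn hip hpm hsl hmin
    simp only [naiveFrom]
    by_cases hie : i = p
    · subst hie
      rw [if_pos hsl]
    · rw [if_neg (hmin i le_rfl (by omega))]
      exact ih (i + 1) p (by omega) (by omega) hpm hsl (fun q hq => hmin q (by omega))

theorem naiveFrom_nonneg (seq pat : List Int) :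
    ∀ (k i : Nat) (v : Int), naiveFrom seq pat i k = some v → 0 ≤ v := by
  intro k
  induction k with
  | zero =>
    intro i v h
    simp only [naiveFrom] at h
    split_ifs at h
    injection h with h'
    omega
  | succ k ih =>
    intro i v h
    simp only [naiveFrom] at h
    split_ifs at h
    · injection h with h'; omega
    · exact ih _ _ h

-- shifting a suffix of the processed window back onto seq
theorem slice_shift (seq : List Int) (s p m : Nat) (hsp : s ≤ p) :
    ((seq.drop s).take (p + m - s)).drop (p - s) = (seq.drop p).take m := by
  rw [List.drop_take, List.drop_drop]
  congr 1
  · omega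
  · congr 1; omega

theorem suffix_to_slice (seq pat : List Int) (s i : Nat) (hin : i + 1 ≤ seq.length)
    (hsuf : pat <:+ (seq.drop s).take (i + 1 - s)) (hsi : s ≤ i + 1) :
    s + pat.length ≤ i + 1 ∧ (seq.drop (i + 1 - pat.length)).take pat.length = pat := by
  have hlen : pat.length ≤ ((seq.drop s).take (i + 1 - s)).length := hsuf.length_le
  have hlen' : ((seq.drop s).take (i + 1 - s)).length = i + 1 - s := by
    simp only [List.length_take, List.length_drop]
    omega
  have hsm : s + pat.length ≤ i + 1 := by omega
  refine ⟨hsm, ?_⟩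
  have := List.suffix_iff_eq_drop.mp hsuf
  rw [hlen'] at this
  have hrw := slice_shift seq s (i + 1 - pat.length) pat.length (by omega)
  have e1 : i + 1 - pat.length + pat.length - s = i + 1 - s := by omega
  have e2 : i + 1 - pat.length - s = i + 1 - s - pat.length := by omega
  rw [e1, e2] at hrw
  rw [hrw] at this
  exact this.symm

theorem slice_to_suffix (seq pat : List Int) (s p : Nat) (hsp : s ≤ p)
    (heq : (seq.drop p).take pat.length = pat) :
    pat <:+ (seq.drop s).take (p + pat.length - s) := by
  have h := slice_shift seq s p pat.length hsp
  rw [heq] at h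
  have hs := List.drop_suffix (p - s) ((seq.drop s).take (p + pat.length - s))
  rwa [h] at hs

-- the main KMP loop invariant
theorem search_eq (seq pat fail : List Int) (s : Nat) (hm : 1 ≤ pat.length)
    (hF : ∀ c : Nat, 0 < c → c ≤ pat.length →
      (PySem.List.pyGet? fail ((c : Int) - 1)).getD 0 = (brd pat c : Int)) :
    ∀ (cnt i j : Nat), i + cnt = seq.length → s ≤ i →
      j = matchLen pat ((seq.drop s).take (i - s)) → j < pat.length →
      (∀ p, s ≤ p → p + pat.length ≤ i → (seq.drop p).take pat.length ≠ pat) →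
      s + pat.length ≤ seq.length →
      kmpSearch seq pat fail (pat.length : Int) (PySem.List.pyRange (i : Int) (seq.length : Int) 1) (j : Int)
        = naiveFrom seq pat s (seq.length - pat.length - s) := by
  intro cnt
  induction cnt with
  | zero =>
    intro i j hn hsi hj hjm hno hsm
    have hieq : i = seq.length := by omega
    rw [PySem.List.pyRange_one_eq_nil (by omega)]
    simp only [kmpSearch]
    symm
    apply naiveFrom_none seq pat _ s (by omega)
    intro p hp hpm
    exact hno p hp (by omega)
  | succ cnt ih =>
    intro i j hn hsi hj hjm hno hsm
    rw [PySem.List.pyRange_one_cons (by omega)]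
    simp only [kmpSearch]
    have hx : (PySem.List.pyGet? seq (i : Int)).getD 0 = seq.getD i 0 := by
      rw [PySem.List.pyGet?_natCast, List.getD_eq_getElem?_getD]
    set x := seq.getD i 0 with hxdef
    have hjt : ((j : Nat) : Int).toNat = j := by simp
    have hFj : ∀ c : Nat, 0 < c → c ≤ j →
        (PySem.List.pyGet? fail ((c : Int) - 1)).getD 0 = (brd pat c : Int) :=
      fun c hc hcj => hF c hc (by omega)
    have hfall : kmpFall pat fail x ((j : Nat) : Int).toNat ((j : Nat) : Int)
        = ((gF pat x j j : Nat) : Int) := by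
      rw [hjt]; exact kmpFall_eq_gF pat fail x j j hFj
    have hgp : (PySem.List.pyGet? pat ((gF pat x j j : Nat) : Int)).getD 0
        = pat.getD (gF pat x j j) 0 := by
      rw [PySem.List.pyGet?_natCast, List.getD_eq_getElem?_getD]
    -- the new automaton state is matchLen of the extended window
    have hwin : (seq.drop s).take (i + 1 - s) = (seq.drop s).take (i - s) ++ [x] := by
      have h1 : i + 1 - s = (i - s) + 1 := by omega
      rw [h1, List.take_add_one]
      have h2 : (seq.drop s)[i - s]? = some x := by
        rw [List.getElem?_drop]
        have : s + (i - s) = i := by omega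
        rw [this]
        rw [List.getElem?_eq_getElem (by omega)]
        rw [hxdef, List.getD_eq_getElem?_getD, List.getElem?_eq_getElem (by omega)]
        rfl
      rw [h2]
      rfl
    have hnewj : matchLen pat ((seq.drop s).take (i + 1 - s)) = gStep pat x j j := by
      rw [hwin, hj]
      exact matchLen_snoc pat ((seq.drop s).take (i - s)) x
        (matchLen pat ((seq.drop s).take (i - s))) hm le_rfl (by omega)
    have hindj2 : (if x = pat.getD (gF pat x j j) 0
        then ((gF pat x j j : Nat) : Int) + 1 else ((gF pat x j j : Nat) : Int))
        = ((gStep pat x j j : Nat) : Int) := by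
      unfold gStep
      split_ifs <;> push_cast <;> ring
    rw [hx, hfall, hgp, hindj2]
    by_cases hdone : ((gStep pat x j j : Nat) : Int) = (pat.length : Int)
    · rw [if_pos hdone]
      have hgm : gStep pat x j j = pat.length := by exact_mod_cast hdone
      have hsufm : pat <:+ (seq.drop s).take (i + 1 - s) := by
        have h1 : matchLen pat ((seq.drop s).take (i + 1 - s)) = pat.length := by
          rw [hnewj]; exact hgm
        have h0 : (fun k => pat.take k <:+ (seq.drop s).take (i + 1 - s)) 0 := by simp
        have := Nat.findGreatest_spec (P := fun k => pat.take k <:+ (seq.drop s).take (i + 1 - s))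
          (Nat.zero_le pat.length) h0
        rw [matchLen] at h1
        rw [h1, List.take_length] at this
        exact this
      obtain ⟨hsm1, hslice⟩ := suffix_to_slice seq pat s i (by omega) hsufm (by omega)
      symm
      have hcast : (i : Int) - (pat.length : Int) + 1 = ((i + 1 - pat.length : Nat) : Int) := by
        omega
      rw [hcast]
      apply naiveFrom_some seq pat _ s (i + 1 - pat.length) (by omega) (by omega) (by omega) hslice
      intro q hq hqlt
      exact hno q hq (by omega)
    · rw [if_neg hdone]
      have hgle : gStep pat x j j ≤ pat.length := by
        have : matchLen pat ((seq.drop s).take (i + 1 - s)) ≤ pat.length := Nat.findGreatest_le _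
        omega
      have hglt : gStep pat x j j < pat.length := by
        rcases lt_or_eq_of_le hgle with h | h
        · exact h
        · exact absurd (by exact_mod_cast h) hdone
      have hcast : (i : Int) + 1 = ((i + 1 : Nat) : Int) := by push_cast; ring
      rw [hcast]
      apply ih (i + 1) (gStep pat x j j) (by omega) (by omega) hnewj.symm hglt _ hsm
      intro p hp hpm
      by_cases hpe : p + pat.length = i + 1
      · intro heq
        have hsufp := slice_to_suffix seq pat s p (by omega) heq
        have : p + pat.length - s = i + 1 - s := by omega
        rw [this] at hsufp
        have : pat.length ≤ matchLen pat ((seq.drop s).take (i + 1 - s)) :=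
          Nat.le_findGreatest le_rfl (by simpa [List.take_length] using hsufp)
        omega
      · exact hno p hp (by omega)

-- B's port reduced to the naive scan from max(start_idx, 0)
theorem alt_eq_naive (seq pat : List Int) (start_idx : Int) (hpat : pat ≠ []) :
    find_first_pattern_after_alt seq (some pat) start_idx
      = if (max start_idx 0) + (pat.length : Int) ≤ (seq.length : Int)
        then naiveFrom seq pat (max start_idx 0).toNat
              (seq.length - pat.length - (max start_idx 0).toNat)
        else none := by
  have hm : 1 ≤ pat.length := List.length_pos_iff.mpr hpat
  simp only [find_first_pattern_after_alt, PySem.List.len_eq]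
  rw [if_neg (by exact_mod_cast (by omega : ¬ ((pat.length : Int) = 0)))]
  have hB : (if start_idx > 0 then start_idx else 0) = max start_idx 0 := by
    split_ifs <;> omega
  rw [hB]
  by_cases hg : max start_idx 0 + (pat.length : Int) > (seq.length : Int)
  · rw [if_pos hg, if_neg (by omega)]
  · rw [if_neg hg, if_pos (by omega)]
    have hs0 : max start_idx 0 = (((max start_idx 0).toNat : Nat) : Int) := by omega
    rw [hs0]
    apply search_eq seq pat (buildFail pat) (max start_idx 0).toNat hm (buildFail_spec pat hm)
      (seq.length - (max start_idx 0).toNat) _ 0 (by omega) le_rfl _ (by omega) _ (by omega)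
    · have h1 : (max start_idx 0).toNat - (max start_idx 0).toNat = 0 := by omega
      rw [h1, List.take_zero]
      symm
      rw [matchLen]
      rw [Nat.findGreatest_eq_iff]
      refine ⟨Nat.zero_le _, by omega, ?_⟩
      intro k hk0 hkm hP
      have : pat.take k = [] := List.suffix_nil.mp hP
      have := congrArg List.length this
      simp only [List.length_take, List.length_nil] at this
      omega
    · intro p hp hpm
      omega

-- A-side: the scan over nonnegative candidate indices is the naive scan
theorem scan_nonneg (seq pat : List Int) :
    ∀ (k i : Nat), i + pat.length + k = seq.length →
      (PySem.List.pyRange (i : Int) ((seq.length : Int) - (pat.length : Int) + 1) 1).findSome?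
        (fun j => if PySem.List.slice seq (some j) (some (j + (pat.length : Int))) = pat then some j else none)
        = naiveFrom seq pat i k := by
  intro k
  induction k with
  | zero =>
    intro i hn
    rw [PySem.List.pyRange_one_cons (by omega), List.findSome?_cons]
    have hs : PySem.List.slice seq (some (i : Int)) (some ((i : Int) + (pat.length : Int))) = (seq.drop i).take pat.length := by
      rw [PySem.List.slice_toNat seq (by positivity) (by positivity)]
      congr 1 <;> omega
    rw [hs]
    have hnil : PySem.List.pyRange ((i : Int) + 1) ((seq.length : Int) - (pat.length : Int) + 1) 1 = [] :=
      PySem.List.pyRange_one_eq_nil (by omega)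
    simp only [naiveFrom, hnil, List.findSome?_nil]
    split_ifs <;> rfl
  | succ k ih =>
    intro i hn
    rw [PySem.List.pyRange_one_cons (by omega), List.findSome?_cons]
    have hs : PySem.List.slice seq (some (i : Int)) (some ((i : Int) + (pat.length : Int))) = (seq.drop i).take pat.length := by
      rw [PySem.List.slice_toNat seq (by positivity) (by positivity)]
      congr 1 <;> omega
    rw [hs]
    simp only [naiveFrom]
    split_ifs with h
    · rfl
    · have hc : ((i : Int) + 1) = ((i + 1 : Nat) : Int) := by push_cast; ring
      rw [hc]
      exact ih (i + 1) (by omega)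

-- with no wrapped occurrence available, every negative candidate index fails A's slice test
theorem neg_fail (seq pat : List Int) (start_idx : Int) (hm : pat ≠ [])
    (hno : ¬ ∃ p ∈ List.range seq.length,
        (seq.length : Int) + start_idx ≤ (p : Int) ∧
        (p : Int) + (pat.length : Int) < (seq.length : Int) ∧
        (seq.drop p).take pat.length = pat) :
    ∀ i : Int, start_idx ≤ i → i < 0 →
      PySem.List.slice seq (some i) (some (i + (pat.length : Int))) ≠ pat := by
  intro i h1 h2 heq
  have hm1 : 1 ≤ pat.length := List.length_pos_iff.mpr hm
  have hlen : PySem.List.clampIdx seq.length (i + (pat.length : Int)) - PySem.List.clampIdx seq.length i = pat.length := by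
    rw [← PySem.List.length_slice, heq]
  have hslice : PySem.List.slice seq (some i) (some (i + (pat.length : Int)))
      = (seq.drop (PySem.List.clampIdx seq.length i)).take
          (PySem.List.clampIdx seq.length (i + (pat.length : Int)) - PySem.List.clampIdx seq.length i) := by
    rfl
  by_cases hcase : 0 ≤ i + (pat.length : Int)
  · have he : PySem.List.clampIdx seq.length (i + (pat.length : Int)) = min (i + (pat.length : Int)).toNat seq.length := by
      simp only [PySem.List.clampIdx]
      rw [if_neg (by omega)]
    have hs0 : ¬ (i + (pat.length : Int)).toNat ≥ pat.length := by omega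
    omega
  · push_neg at hcase
    by_cases hc2 : (seq.length : Int) + i + (pat.length : Int) < 0
    · have he : PySem.List.clampIdx seq.length (i + (pat.length : Int)) = 0 := by
        simp only [PySem.List.clampIdx]
        rw [if_pos (by omega), if_pos (by omega)]
      omega
    · push_neg at hc2
      by_cases hc3 : (seq.length : Int) + i < 0
      · have he : PySem.List.clampIdx seq.length (i + (pat.length : Int)) = ((seq.length : Int) + i + (pat.length : Int)).toNat := by
          simp only [PySem.List.clampIdx, if_pos hcase]
          rw [if_neg (by omega)]
          congr 1; ring
        have hs : PySem.List.clampIdx seq.length i = 0 := by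
          simp only [PySem.List.clampIdx, if_pos h2]
          rw [if_pos (by omega)]
        omega
      · push_neg at hc3
        have hs : PySem.List.clampIdx seq.length i = ((seq.length : Int) + i).toNat := by
          simp only [PySem.List.clampIdx, if_pos h2]
          rw [if_neg (by omega)]
        apply hno
        refine ⟨((seq.length : Int) + i).toNat, ?_, by omega, by omega, ?_⟩
        · rw [List.mem_range]; omega
        · rw [hslice, hlen] at heq
          rw [← hs]; exact heq

theorem scan_drop_neg (b : Int) (F : Int → Option Int) :
    ∀ (t : Nat) (a : Int), (-a).toNat ≤ t → (∀ i, a ≤ i → i < 0 → F i = none) →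
      (PySem.List.pyRange a b 1).findSome? F = (PySem.List.pyRange (max a 0) b 1).findSome? F := by
  intro t
  induction t with
  | zero =>
    intro a ht _
    have : max a 0 = a := by omega
    rw [this]
  | succ t ih =>
    intro a ht hF
    by_cases ha : 0 ≤ a
    · have : max a 0 = a := by omega
      rw [this]
    · push_neg at ha
      by_cases hb : b ≤ a
      · rw [PySem.List.pyRange_one_eq_nil hb, PySem.List.pyRange_one_eq_nil (by omega)]
      · push_neg at hb
        rw [PySem.List.pyRange_one_cons hb, List.findSome?_cons, hF a le_rfl ha]
        have hmax : max a 0 = max (a + 1) 0 := by omega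
        rw [hmax]
        exact ih (a + 1) (by omega) (fun i h1 h2 => hF i (by omega) h2)

-- ===== VERDICT (by name: the statement is the Claim_ definition above) =====
theorem find_first_pattern_after_spec : Claim_unchanged_find_first_pattern_after := by
  intro seq pattern start_idx _hDom hnD
  cases pattern with
  | none => rfl
  | some pat =>
    by_cases hm0 : pat = []
    · subst hm0
      simp only [find_first_pattern_after, find_first_pattern_after_alt, PySem.List.len_eq]
      rw [if_pos (Or.inl (by simp)), if_pos (by simp)]
    · have hm1 : 1 ≤ pat.length := List.length_pos_iff.mpr hm0
      rw [alt_eq_naive seq pat start_idx hm0]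
      simp only [find_first_pattern_after, PySem.List.len_eq]
      have hno : start_idx < 0 → start_idx ≤ (seq.length : Int) - (pat.length : Int) →
          ¬ ∃ p ∈ List.range seq.length,
              (seq.length : Int) + start_idx ≤ (p : Int) ∧
              (p : Int) + (pat.length : Int) < (seq.length : Int) ∧
              (seq.drop p).take pat.length = pat := by
        intro hs hle hex
        obtain ⟨p, hp, h1, h2, h3⟩ := hex
        exact hnD ⟨by simpa using hm0, hs,
          ⟨p, hp, by simpa using h1, by simp only [Option.getD_some]; omega,
            by simpa using List.prefix_iff_eq_take.mpr h3.symm⟩⟩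
      by_cases hguard : start_idx > (seq.length : Int) - (pat.length : Int)
      · rw [if_pos (Or.inr hguard)]
        rw [if_neg (by omega)]
      · rw [if_neg (by
          rintro (h | h)
          · have : pat.length = 0 := by exact_mod_cast h
            omega
          · exact hguard h)]
        have hFnone : ∀ i : Int, start_idx ≤ i → i < 0 →
            (fun j => if PySem.List.slice seq (some j) (some (j + (pat.length : Int))) = pat then some j else none) i = none := by
          intro i hi hineg
          have := neg_fail seq pat start_idx hm0 (hno (by omega) (by omega)) i hi hineg
          simp only [if_neg this]
        refine Eq.trans (scan_drop_neg ((seq.length : Int) - (pat.length : Int) + 1) _ ((-start_idx).toNat) start_idx le_rfl hFnone) ?_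
        by_cases hend : (seq.length : Int) - (pat.length : Int) + 1 ≤ max start_idx 0
        · rw [PySem.List.pyRange_one_eq_nil hend, List.findSome?_nil]
          rw [if_neg (by omega)]
        · push_neg at hend
          rw [if_pos (by omega)]
          have hcast : max start_idx 0 = (((max start_idx 0).toNat : Nat) : Int) := by omega
          rw [hcast]
          have harith : (max start_idx 0).toNat + pat.length + (seq.length - pat.length - (max start_idx 0).toNat) = seq.length := by
            omega
          exact scan_nonneg seq pat _ _ harith

theorem find_first_pattern_after_changed : Claim_changed_find_first_pattern_after := by
  unfold Claim_changed_find_first_pattern_after; decide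

-- a scan whose negative prefix contains a hit returns some negative index
theorem first_neg (l1 l2 : List Int) (f : Int → Option Int)
    (hx : ∃ x ∈ l1, (f x).isSome)
    (hneg : ∀ x ∈ l1, ∀ j, f x = some j → j < 0) :
    ∃ j, (l1 ++ l2).findSome? f = some j ∧ j < 0 := by
  rw [List.findSome?_append]
  have h1 : (l1.findSome? f).isSome := List.findSome?_isSome_iff.mpr hx
  obtain ⟨j, hj⟩ := Option.isSome_iff_exists.mp h1
  obtain ⟨x, hxl, hfx⟩ := List.exists_of_findSome?_eq_some hj
  exact ⟨j, by rw [hj]; rfl, hneg x hxl j hfx⟩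

-- the wrapped slice seq[p-n : p-n+m] is the real window at p when p+m < n
theorem slice_wrap (seq pat : List Int) (p : Nat)
    (h : (p : Int) + (pat.length : Int) < (seq.length : Int)) :
    PySem.List.slice seq (some ((p : Int) - (seq.length : Int)))
        (some ((p : Int) - (seq.length : Int) + (pat.length : Int)))
      = (seq.drop p).take pat.length := by
  have e1 : PySem.List.clampIdx seq.length ((p : Int) - (seq.length : Int)) = p := by
    simp only [PySem.List.clampIdx]
    rw [if_pos (by omega), if_neg (by omega)]
    omega
  have e2 : PySem.List.clampIdx seq.length ((p : Int) - (seq.length : Int) + (pat.length : Int)) = p + pat.length := by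
    simp only [PySem.List.clampIdx]
    rw [if_pos (by omega), if_neg (by omega)]
    omega
  have hdef : PySem.List.slice seq (some ((p : Int) - (seq.length : Int)))
      (some ((p : Int) - (seq.length : Int) + (pat.length : Int)))
      = (seq.drop (PySem.List.clampIdx seq.length ((p : Int) - (seq.length : Int)))).take
          (PySem.List.clampIdx seq.length ((p : Int) - (seq.length : Int) + (pat.length : Int))
            - PySem.List.clampIdx seq.length ((p : Int) - (seq.length : Int))) := rfl
  rw [hdef, e1, e2]
  congr 1
  omega

theorem find_first_pattern_after_tight : Claim_exact_find_first_pattern_after := by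
  intro seq pattern start_idx _hDom hD
  obtain ⟨hpat', hs, p, hpmem, hp1, hp2, hp3pre⟩ := hD
  cases pattern with
  | none => exact absurd rfl hpat'
  | some pat =>
    simp only [Option.getD_some] at hpat' hp2 hp3pre
    have hp3 : (seq.drop p).take pat.length = pat := (List.prefix_iff_eq_take.mp hp3pre).symm
    have hp2i : (p : Int) + (pat.length : Int) < (seq.length : Int) := by exact_mod_cast hp2
    have hm1 : 1 ≤ pat.length := List.length_pos_iff.mpr hpat'
    have hmi : (1 : Int) ≤ (pat.length : Int) := by exact_mod_cast hm1
    have hpn : p < seq.length := List.mem_range.mp hpmem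
    have hAgu : ¬(((pat.length : Int)) = 0 ∨ start_idx > (seq.length : Int) - (pat.length : Int)) := by
      push_neg
      exact ⟨by omega, by omega⟩
    have hslw := slice_wrap seq pat p hp2i
    have hA : ∃ j, find_first_pattern_after seq (some pat) start_idx = some j ∧ j < 0 := by
      simp only [find_first_pattern_after, PySem.List.len_eq]
      rw [if_neg hAgu,
        PySem.List.pyRange_one_append start_idx 0 ((seq.length : Int) - (pat.length : Int) + 1)
          (le_of_lt hs) (by omega)]
      refine first_neg _ _ _ ⟨(p : Int) - (seq.length : Int), ?_, ?_⟩ ?_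
      · exact PySem.List.mem_pyRange_one.mpr ⟨by omega, by omega⟩
      · show (if PySem.List.slice seq (some ((p : Int) - (seq.length : Int)))
            (some ((p : Int) - (seq.length : Int) + (pat.length : Int))) = pat
            then some ((p : Int) - (seq.length : Int)) else none).isSome
        rw [if_pos (by rw [hslw]; exact hp3)]
        rfl
      · intro x hxl j hfx
        have hx0 : x < 0 := (PySem.List.mem_pyRange_one.mp hxl).2
        split_ifs at hfx
        injection hfx with h'
        omega
    obtain ⟨j, hAj, hjneg⟩ := hA
    have hBnn : ∀ j', find_first_pattern_after_alt seq (some pat) start_idx = some j' → 0 ≤ j' := by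
      intro j' h
      rw [alt_eq_naive seq pat start_idx hpat'] at h
      split_ifs at h
      exact naiveFrom_nonneg seq pat _ _ _ h
    intro hAB
    have := hBnn j (hAB ▸ hAj)
    omega
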